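-- pv_equiv track=rewrite | github.com/be-meyer/dnd-buddy-infrastructure | lambdas/dnd-buddy-agent/tools/translate_runes.py | english_to_runes
-- ===== SOURCE A (Python) =====
-- LETTER_TO_RUNE = {
--     'A': 'ᚨ',   # Ansuz
--     'B': 'ᛒ',   # Berkano
--     'C': 'ᚲ',   # Kaunan
--     'D': 'ᛞ',   # Dagaz
--     'E': 'ᛖ',   # Ehwaz
--     'F': 'ᚠ',   # Fehu
--     'G': 'ᚷ',   # Gebo
--     'H': 'ᚺ',   # Hagalaz
--     'I': 'ᛁ',   # Isa
--     'J': 'ᛃ',   # Jera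
--     'K': 'ᚲ',   # Kaunan (same as C)
--     'L': 'ᛚ',   # Laguz
--     'M': 'ᛗ',   # Mannaz
--     'N': 'ᚾ',   # Nauthiz
--     'O': 'ᛟ',   # Othala
--     'P': 'ᛈ',   # Pertho
--     'Q': 'ᚲᚹ', # Kaunan+Wunjo combined
--     'R': 'ᚱ',   # Raido
--     'S': 'ᛋ',   # Sowilo
--     'T': 'ᛏ',   # Tiwaz
--     'U': 'ᚢ',   # Uruz
--     'V': 'ᚡ',   # V-rune (distinct from W)
--     'W': 'ᚹ',   # Wunjo
--     'X': 'ᛉ',   # Algiz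
--     'Y': 'ᚤ',   # Yr variant (distinct from J)
--     'Z': 'ᛎ',   # Algiz variant (distinct from X)
-- }
--
-- DIGRAPH_TO_RUNE = {
--     'TH': 'ᚦ',  # Thurisaz
--     'NG': 'ᛜ',  # Ingwaz
-- }
--
-- NUMBER_TO_RUNE = {
--     '0': '·',   # Middle dot (void/nothing)
--     '1': 'ᛮ',   # Single stroke
--     '2': 'ᛯ',   # Double stroke
--     '3': 'ᛢ',   # Three-branch
--     '4': 'ᛦ',   # Yr (inverted Algiz)
--     '5': 'ᛤ',   # Five-point
--     '6': 'ᛥ',   # Six-form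
--     '7': 'ᛧ',   # Seven-branch
--     '8': 'ᛨ',   # Eight-form
--     '9': 'ᛩ',   # Nine-form
-- }
--
-- def english_to_runes(text: str) -> str:
--     """Convert English text to Elder Futhark runes."""
--     result = []
--     text_upper = text.upper()
--     i = 0
--
--     while i < len(text_upper):
--         char = text_upper[i]
--
--         # Check for digraphs first (TH, NG)
--         if i + 1 < len(text_upper):
--             digraph = text_upper[i:i+2]
--             if digraph in DIGRAPH_TO_RUNE:
--                 result.append(DIGRAPH_TO_RUNE[digraph])
--                 i += 2
--                 continue
--
--         # Check for numbers
--         if char in NUMBER_TO_RUNE: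
--             result.append(NUMBER_TO_RUNE[char])
--             i += 1
--             continue
--
--         # Check for letters
--         if char in LETTER_TO_RUNE:
--             result.append(LETTER_TO_RUNE[char])
--             i += 1
--             continue
--
--         # Preserve spaces and punctuation
--         if char == ' ':
--             result.append('᛬')  # Two dots for word separator
--         elif char in '.,!?':
--             result.append('᛭')  # Cross for sentence separator
--         else:
--             result.append(char)  # Keep unknown chars as-is
--         i += 1
--
--     return ''.join(result)
-- ===== SOURCE B (Python) =====
-- _DIGITS = '0123456789'
-- _DIGIT_RUNES = ['·','ᛮ','ᛯ','ᛢ','ᛦ','ᛤ','ᛥ','ᛧ','ᛨ','ᛩ']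
-- _LETTERS = 'ABCDEFGHIJKLMNOPQRSTUVWXYZ'
-- _LETTER_RUNES = ['ᚨ','ᛒ','ᚲ','ᛞ','ᛖ','ᚠ','ᚷ','ᚺ','ᛁ','ᛃ','ᚲ','ᛚ','ᛗ','ᚾ','ᛟ','ᛈ','ᚲᚹ','ᚱ','ᛋ','ᛏ','ᚢ','ᚡ','ᚹ','ᛉ','ᚤ','ᛎ']
--
-- def _rune(c):
--     if c in _DIGITS:
--         return _DIGIT_RUNES[_DIGITS.index(c)]
--     if c in _LETTERS:
--         return _LETTER_RUNES[_LETTERS.index(c)]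
--     if c == ' ':
--         return '᛬'
--     if c in '.,!?':
--         return '᛭'
--     return c
--
-- def english_to_runes(text):
--     """Convert English text to Elder Futhark runes."""
--     out = []
--     pending = None  # one-character delay line instead of index lookahead
--     for c in text.upper():
--         if pending == 'T' and c == 'H':
--             out.append('ᚦ')
--             pending = None
--         elif pending == 'N' and c == 'G':
--             out.append('ᛜ')
--             pending = None
--         else:
--             if pending is not None:
--                 out.append(_rune(pending))
--             pending = c
--     if pending is not None:
--         out.append(_rune(pending))
--     return ''.join(out)
-- ===== Notes on version B (the rewrite author's own statement) =====
-- stated objective: alternative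
-- what changed: Replaced the index-based greedy lookahead while-loop and three dict lookups by a single stateful pass: a one-character delay line (pending) that fuses TH/NG as the second character arrives, with per-character translation by parallel index tables instead of dicts.
import Mathlib
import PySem

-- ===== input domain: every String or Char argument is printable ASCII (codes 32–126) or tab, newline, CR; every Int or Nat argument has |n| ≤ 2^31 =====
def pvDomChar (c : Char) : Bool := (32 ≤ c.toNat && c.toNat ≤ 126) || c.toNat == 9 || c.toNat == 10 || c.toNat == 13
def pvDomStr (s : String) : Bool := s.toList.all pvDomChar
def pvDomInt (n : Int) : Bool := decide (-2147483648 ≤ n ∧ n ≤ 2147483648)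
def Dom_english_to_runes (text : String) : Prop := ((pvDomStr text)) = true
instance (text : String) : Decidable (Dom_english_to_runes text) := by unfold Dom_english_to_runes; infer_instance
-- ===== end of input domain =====

-- B replaces A's index-based greedy lookahead while-loop and dict lookups by a single stateful
-- pass with a one-character delay line (pending) and parallel index tables; objective: alternative.

-- ===== PORT A =====
-- NUMBER_TO_RUNE / LETTER_TO_RUNE / DIGRAPH_TO_RUNE of the Python module (1-char keys are Chars,
-- the 2-char digraph keys are Char pairs; exact on these keys)
def pvNum : PySem.Dict Char (List Char) := PySem.Dict.ofList
  [('0',['·']),('1',['ᛮ']),('2',['ᛯ']),('3',['ᛢ']),('4',['ᛦ']),('5',['ᛤ']),('6',['ᛥ']),('7',['ᛧ']),('8',['ᛨ']),('9',['ᛩ'])]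
def pvLet : PySem.Dict Char (List Char) := PySem.Dict.ofList
  [('A',['ᚨ']),('B',['ᛒ']),('C',['ᚲ']),('D',['ᛞ']),('E',['ᛖ']),('F',['ᚠ']),('G',['ᚷ']),
   ('H',['ᚺ']),('I',['ᛁ']),('J',['ᛃ']),('K',['ᚲ']),('L',['ᛚ']),('M',['ᛗ']),('N',['ᚾ']),
   ('O',['ᛟ']),('P',['ᛈ']),('Q',['ᚲ','ᚹ']),('R',['ᚱ']),('S',['ᛋ']),('T',['ᛏ']),('U',['ᚢ']),
   ('V',['ᚡ']),('W',['ᚹ']),('X',['ᛉ']),('Y',['ᚤ']),('Z',['ᛎ'])]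
def pvDig : PySem.Dict (Char × Char) (List Char) :=
  PySem.Dict.ofList [(('T','H'),['ᚦ']),(('N','G'),['ᛜ'])]

-- the number / letter / space / punctuation / fallthrough branch chain of A's loop body
def pvSingleA (c : Char) : List Char :=
  if pvNum.contains c then pvNum.getD c []
  else if pvLet.contains c then pvLet.getD c []
  else if c = ' ' then ['᛬']
  else if c ∈ ['.', ',', '!', '?'] then ['᛭']
  else [c]

-- A's while loop over i: structural recursion on the remaining characters; text_upper[i:i+2]
-- is the two leading characters, 'i += 2; continue' drops both, else drop one
def pvLoopA : List Char → List (List Char)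
  | c1 :: c2 :: rest =>
    if pvDig.contains (c1, c2) then pvDig.getD (c1, c2) [] :: pvLoopA rest
    else pvSingleA c1 :: pvLoopA (c2 :: rest)
  | [c] => [pvSingleA c]
  | [] => []

def english_to_runes (text : String) : String :=
  String.mk (PySem.Chars.join [] (pvLoopA (PySem.Chars.upper text.toList)))

-- ===== PORT B =====
-- parallel index tables (_DIGITS/_DIGIT_RUNES, _LETTERS/_LETTER_RUNES of Source B)
def pvDigits : List Char := ['0','1','2','3','4','5','6','7','8','9']
def pvDigitRunes : List (List Char) :=
  [['·'],['ᛮ'],['ᛯ'],['ᛢ'],['ᛦ'],['ᛤ'],['ᛥ'],['ᛧ'],['ᛨ'],['ᛩ']]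
def pvLetters : List Char :=
  ['A','B','C','D','E','F','G','H','I','J','K','L','M','N','O','P','Q','R','S','T','U','V','W','X','Y','Z']
def pvLetterRunes : List (List Char) :=
  [['ᚨ'],['ᛒ'],['ᚲ'],['ᛞ'],['ᛖ'],['ᚠ'],['ᚷ'],['ᚺ'],['ᛁ'],['ᛃ'],['ᚲ'],['ᛚ'],['ᛗ'],['ᚾ'],
   ['ᛟ'],['ᛈ'],['ᚲ','ᚹ'],['ᚱ'],['ᛋ'],['ᛏ'],['ᚢ'],['ᚡ'],['ᚹ'],['ᛉ'],['ᚤ'],['ᛎ']]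

-- _rune of Source B; str.index is List.idxOf here, exact since it runs only under the membership guard
def pvRuneB (c : Char) : List Char :=
  if c ∈ pvDigits then pvDigitRunes.getD (pvDigits.idxOf c) [c]
  else if c ∈ pvLetters then pvLetterRunes.getD (pvLetters.idxOf c) [c]
  else if c = ' ' then ['᛬']
  else if c ∈ ['.', ',', '!', '?'] then ['᛭']
  else [c]

-- the body of Source B's for-loop: state = (out, pending)
def pvStepB (st : List (List Char) × Option Char) (c : Char) : List (List Char) × Option Char :=
  if st.2 = some 'T' ∧ c = 'H' then (st.1 ++ [['ᚦ']], none)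
  else if st.2 = some 'N' ∧ c = 'G' then (st.1 ++ [['ᛜ']], none)
  else
    match st.2 with
    | some p => (st.1 ++ [pvRuneB p], some c)
    | none => (st.1, some c)

-- the final 'if pending is not None' flush of Source B
def pvFlushB (st : List (List Char) × Option Char) : List (List Char) :=
  match st.2 with
  | some p => st.1 ++ [pvRuneB p]
  | none => st.1

def english_to_runes_alt (text : String) : String :=
  String.mk (PySem.Chars.join []
    (pvFlushB ((PySem.Chars.upper text.toList).foldl pvStepB ([], none))))

-- ===== PRECONDITION & SPEC =====
def Spec_english_to_runes (text : String) (out : String) : Prop := out = english_to_runes_alt text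
instance (text : String) (out : String) : Decidable (Spec_english_to_runes text out) := by unfold Spec_english_to_runes; infer_instance

-- ===== CLAIM (what is proved, stated in full; the proofs are below) =====
def Claim_equal_english_to_runes : Prop := ∀ (text : String), Dom_english_to_runes text → Spec_english_to_runes text (english_to_runes text)

-- ===== LEMMAS AND PROOFS =====

-- A's per-character branch chain agrees with B's index-table lookup on every Char
set_option maxHeartbeats 2000000 in
set_option maxRecDepth 8192 in
lemma singleA_eq_runeB (c : Char) : pvSingleA c = pvRuneB c := by
  by_cases hd : c ∈ pvDigits
  · simp only [pvDigits, List.mem_cons, List.not_mem_nil, or_false] at hd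
    rcases hd with rfl|rfl|rfl|rfl|rfl|rfl|rfl|rfl|rfl|rfl <;> rfl
  · by_cases hl : c ∈ pvLetters
    · simp only [pvLetters, List.mem_cons, List.not_mem_nil, or_false] at hl
      rcases hl with rfl|rfl|rfl|rfl|rfl|rfl|rfl|rfl|rfl|rfl|rfl|rfl|rfl|rfl|rfl|rfl|rfl|rfl|rfl|rfl|rfl|rfl|rfl|rfl|rfl|rfl <;> rfl
    · have hn : pvNum.contains c = false := by
        have : pvNum.keys = pvDigits := by decide
        rw [PySem.Dict.contains_eq_decide_mem_keys, this]
        simpa using hd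
      have hltc : pvLet.contains c = false := by
        have : pvLet.keys = pvLetters := by decide
        rw [PySem.Dict.contains_eq_decide_mem_keys, this]
        simpa using hl
      simp [pvSingleA, pvRuneB, hn, hltc, hd, hl]

lemma dig_contains (c1 c2 : Char) :
    pvDig.contains (c1, c2) = (decide ((c1, c2) = ('T','H')) || decide ((c1, c2) = ('N','G'))) := by
  have hD : pvDig = PySem.Dict.mk [(('T','H'),['ᚦ']),(('N','G'),['ᛜ'])] := by decide
  rw [hD, PySem.Dict.contains_eq_decide_mem_keys, PySem.Dict.keys_mk]
  simp [List.mem_cons]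

-- main invariant: flushing B's fold started with empty pending yields exactly A's greedy chunks
lemma flush_foldl_eq (l : List Char) :
    ∀ acc, pvFlushB (l.foldl pvStepB (acc, none)) = acc ++ pvLoopA l := by
  have H : ∀ (n : Nat) (l : List Char), l.length ≤ n → ∀ acc,
      pvFlushB (l.foldl pvStepB (acc, none)) = acc ++ pvLoopA l := by
    intro n
    induction n with
    | zero =>
      intro l hl acc
      have : l = [] := List.eq_nil_of_length_eq_zero (Nat.le_zero.mp hl)
      subst this; simp [pvFlushB, pvLoopA]
    | succ n ih =>
      intro l hl acc
      match l with
      | [] => simp [pvFlushB, pvLoopA]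
      | [c] =>
        show pvFlushB (pvStepB (acc, none) c) = acc ++ pvLoopA [c]
        rw [pvLoopA]
        simp [pvStepB, pvFlushB, singleA_eq_runeB]
      | c1 :: c2 :: t =>
        have h1 : pvStepB (acc, none) c1 = (acc, some c1) := by
          simp [pvStepB]
        rw [pvLoopA]
        by_cases hTH : (c1, c2) = ('T', 'H')
        · obtain ⟨rfl, rfl⟩ := Prod.mk.inj hTH
          have h2 : pvStepB (acc, some 'T') 'H' = (acc ++ [['ᚦ']], none) := by
            simp [pvStepB]
          rw [if_pos (by rw [dig_contains]; simp)]
          show pvFlushB (t.foldl pvStepB (pvStepB (pvStepB (acc, none) 'T') 'H')) = _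
          rw [h1, h2, ih t (by simp at hl; omega)]
          simp
          rfl
        · by_cases hNG : (c1, c2) = ('N', 'G')
          · obtain ⟨rfl, rfl⟩ := Prod.mk.inj hNG
            have h2 : pvStepB (acc, some 'N') 'G' = (acc ++ [['ᛜ']], none) := by
              simp [pvStepB]
            rw [if_pos (by rw [dig_contains]; simp)]
            show pvFlushB (t.foldl pvStepB (pvStepB (pvStepB (acc, none) 'N') 'G')) = _
            rw [h1, h2, ih t (by simp at hl; omega)]
            simp
            rfl
          · rw [if_neg (by rw [dig_contains]; simp [hTH, hNG])]
            have h2 : pvStepB (acc, some c1) c2 = (acc ++ [pvRuneB c1], some c2) := by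
              have e1 : ¬ ((acc, some c1).2 = some 'T' ∧ c2 = 'H') := by
                rintro ⟨hp, rfl⟩
                exact hTH (by simp at hp; rw [hp])
              have e2 : ¬ ((acc, some c1).2 = some 'N' ∧ c2 = 'G') := by
                rintro ⟨hp, rfl⟩
                exact hNG (by simp at hp; rw [hp])
              simp only [pvStepB, if_neg e1, if_neg e2]
            -- re-express the tail fold as a fold over c2 :: t from an empty pending
            have h3 : (c2 :: t).foldl pvStepB (acc ++ [pvRuneB c1], none) =
                t.foldl pvStepB (acc ++ [pvRuneB c1], some c2) := by
              show t.foldl pvStepB (pvStepB (acc ++ [pvRuneB c1], none) c2) = _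
              simp [pvStepB]
            show pvFlushB (t.foldl pvStepB (pvStepB (pvStepB (acc, none) c1) c2)) = _
            rw [h1, h2, ← h3, ih (c2 :: t) (by simp at hl ⊢; omega)]
            rw [singleA_eq_runeB]
            simp
  intro acc
  exact H l.length l le_rfl acc

-- ===== VERDICT (by name: the statement is the Claim_ definition above) =====
theorem english_to_runes_spec : Claim_equal_english_to_runes := by
  intro text _
  unfold Spec_english_to_runes english_to_runes english_to_runes_alt
  rw [flush_foldl_eq]
  simp
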